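-- pv_equiv track=rewrite | github.com/lucianoaf8/sisense_flask | tests/simulate_user_actions.py | _substitute_endpoint_ids
-- ===== SOURCE A (Python) =====
-- def _substitute_endpoint_ids(endpoint: str) -> str:
--     """Substitute placeholder IDs in endpoints with realistic values."""
--     substitutions = {
--         "{dashboard_id}": "507f1f77bcf86cd799439011",
--         "{widget_id}": "507f1f77bcf86cd799439012",
--         "{datasource_id}": "507f1f77bcf86cd799439013",
--         "{connection_id}": "507f1f77bcf86cd799439014",
--         "{user_id}": "507f1f77bcf86cd799439015"
--     }
--
--     result = endpoint
--     for placeholder, value in substitutions.items():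
--         result = result.replace(placeholder, value)
--
--     return result
-- ===== SOURCE B (Python) =====
-- import re
--
-- _SUBSTITUTIONS = {
--     "{dashboard_id}": "507f1f77bcf86cd799439011",
--     "{widget_id}": "507f1f77bcf86cd799439012",
--     "{datasource_id}": "507f1f77bcf86cd799439013",
--     "{connection_id}": "507f1f77bcf86cd799439014",
--     "{user_id}": "507f1f77bcf86cd799439015",
-- }
--
-- _PATTERN = re.compile("|".join(re.escape(k) for k in _SUBSTITUTIONS))
--
--
-- def _substitute_endpoint_ids(endpoint: str) -> str:
--     """Substitute placeholder IDs in endpoints with realistic values."""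
--     return _PATTERN.sub(lambda m: _SUBSTITUTIONS[m.group(0)], endpoint)
-- ===== Notes on version B (the rewrite author's own statement) =====
-- stated objective: idiomatic
-- what changed: A runs five sequential full-string .replace passes (one per placeholder, building five intermediate strings); B compiles one regex alternation over the re.escape'd keys and does a single left-to-right re.sub pass with a dict-lookup callback.
import Mathlib
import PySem

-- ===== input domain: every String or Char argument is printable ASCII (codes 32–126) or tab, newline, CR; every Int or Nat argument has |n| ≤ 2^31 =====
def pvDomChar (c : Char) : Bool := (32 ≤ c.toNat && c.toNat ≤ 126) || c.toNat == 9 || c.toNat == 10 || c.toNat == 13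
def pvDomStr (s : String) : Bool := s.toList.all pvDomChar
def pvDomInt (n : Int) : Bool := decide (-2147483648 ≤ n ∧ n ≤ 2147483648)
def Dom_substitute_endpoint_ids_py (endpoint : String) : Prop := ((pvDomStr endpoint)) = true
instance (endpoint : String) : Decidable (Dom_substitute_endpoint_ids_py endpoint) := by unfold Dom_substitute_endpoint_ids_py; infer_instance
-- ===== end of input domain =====

-- B replaces A's five sequential full-string .replace passes by one left-to-right
-- regex-alternation pass (re.sub with a dict-lookup callback); same results, one scan.


-- ===== PORT A =====
-- A's substitutions dict, as an association list in insertion order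
def pvSubstitutions : List (String × String) :=
  [("{dashboard_id}", "507f1f77bcf86cd799439011"),
   ("{widget_id}", "507f1f77bcf86cd799439012"),
   ("{datasource_id}", "507f1f77bcf86cd799439013"),
   ("{connection_id}", "507f1f77bcf86cd799439014"),
   ("{user_id}", "507f1f77bcf86cd799439015")]

-- 'result = endpoint; for placeholder, value in substitutions.items(): result = result.replace(...)'
def substitute_endpoint_ids_py (endpoint : String) : String :=
  pvSubstitutions.foldl (fun result pv => PySem.Str.replace result pv.1 pv.2) endpoint

-- ===== PORT B =====
-- B compiles the regex alternation of the five re.escape'd keys and calls re.sub once with a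
-- dict-lookup callback.  For this literal-alternation pattern re.sub is exactly one
-- left-to-right scan that, at each position, tries the alternatives in pattern order and on a
-- match emits the substitution and resumes after the matched key; that scan is ported here.
def pvTable : List (List Char × List Char) :=
  [("{dashboard_id}".toList, "507f1f77bcf86cd799439011".toList),
   ("{widget_id}".toList, "507f1f77bcf86cd799439012".toList),
   ("{datasource_id}".toList, "507f1f77bcf86cd799439013".toList),
   ("{connection_id}".toList, "507f1f77bcf86cd799439014".toList),
   ("{user_id}".toList, "507f1f77bcf86cd799439015".toList)]

-- first alternative (in pattern order) matching at the current position, with its length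
def pvFindMatch : List (List Char × List Char) → List Char → Option (List Char × Nat)
  | [], _ => none
  | (k, v) :: ps, l => if k.isPrefixOf l then some (v, k.length) else pvFindMatch ps l

def pvScan : List Char → List Char
  | [] => []
  | c :: t =>
    match pvFindMatch pvTable (c :: t) with
    | some (v, n) => v ++ pvScan (t.drop (n - 1))
    | none => c :: pvScan t
termination_by l => l.length
decreasing_by
  all_goals (simp; try omega)

def substitute_endpoint_ids_py_alt (endpoint : String) : String :=
  String.ofList (pvScan endpoint.toList)

-- ===== PRECONDITION & SPEC =====
def Spec_substitute_endpoint_ids_py (endpoint : String) (out : String) : Prop := out = substitute_endpoint_ids_py_alt endpoint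
instance (endpoint : String) (out : String) : Decidable (Spec_substitute_endpoint_ids_py endpoint out) := by unfold Spec_substitute_endpoint_ids_py; infer_instance

-- ===== CLAIM (what is proved, stated in full; the proofs are below) =====
def Claim_equal_substitute_endpoint_ids_py : Prop := ∀ (endpoint : String), Dom_substitute_endpoint_ids_py endpoint → Spec_substitute_endpoint_ids_py endpoint (substitute_endpoint_ids_py endpoint)

-- ===== LEMMAS AND PROOFS =====

-- structural reading of PySem.Chars.replace (for nonempty pattern)
def pvRepl (old new : List Char) : List Char → List Char
  | [] => []
  | c :: t =>
    if old.isPrefixOf (c :: t) then new ++ pvRepl old new (t.drop (old.length - 1))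
    else c :: pvRepl old new t
termination_by l => l.length
decreasing_by
  all_goals (simp; try omega)

lemma pvRepl_nil (old new : List Char) : pvRepl old new [] = [] := by
  rw [pvRepl.eq_def]

lemma pvRepl_cons_pos (old new : List Char) (c : Char) (t : List Char)
    (h : old.isPrefixOf (c :: t) = true) :
    pvRepl old new (c :: t) = new ++ pvRepl old new (t.drop (old.length - 1)) := by
  rw [pvRepl.eq_def]; simp [h]

lemma pvRepl_cons_neg (old new : List Char) (c : Char) (t : List Char)
    (h : ¬ old.isPrefixOf (c :: t) = true) :
    pvRepl old new (c :: t) = c :: pvRepl old new t := by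
  rw [pvRepl.eq_def]; simp [h]

lemma pvGo_eq (old new : List Char) (hold : old ≠ []) :
    ∀ (fuel : Nat) (l acc : List Char), l.length ≤ fuel →
      PySem.Chars.replace.go old new fuel l acc = acc.reverse ++ pvRepl old new l := by
  intro fuel
  induction fuel with
  | zero =>
    intro l acc h
    have hl : l = [] := List.eq_nil_of_length_eq_zero (Nat.le_zero.mp h)
    subst hl
    rw [PySem.Chars.replace.go, pvRepl_nil]
  | succ n ih =>
    intro l acc h
    cases l with
    | nil =>
      rw [PySem.Chars.replace.go, pvRepl_nil]
      simp
      omega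
    | cons c t =>
      have hol : 0 < old.length := List.length_pos_of_ne_nil hold
      rw [PySem.Chars.replace.go]
      by_cases hp : old.isPrefixOf (c :: t) = true
      · simp only [hp, if_true]
        rw [ih ((c :: t).drop old.length) (new.reverse ++ acc)
          (by simp only [List.length_drop, List.length_cons] at h ⊢; omega),
          pvRepl_cons_pos _ _ _ _ hp]
        have hdrop : (c :: t).drop old.length = t.drop (old.length - 1) := by
          cases old with
          | nil => exact absurd rfl hold
          | cons o os => simp
        rw [hdrop]
        simp
      · simp only [hp]
        rw [ih t (c :: acc) (by simp at h; omega), pvRepl_cons_neg _ _ _ _ hp]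
        simp

lemma pvReplace_eq (old new s : List Char) (hold : old ≠ []) :
    PySem.Chars.replace s old new = pvRepl old new s := by
  unfold PySem.Chars.replace
  rw [if_neg (by simpa using hold)]
  simpa using pvGo_eq old new hold s.length s [] le_rfl

-- pvComp: A's five passes in order, over char lists
def pvComp (ps : List (List Char × List Char)) (s : List Char) : List Char :=
  ps.foldl (fun acc kv => pvRepl kv.1 kv.2 acc) s

lemma portA_eq (e : String) :
    substitute_endpoint_ids_py e = String.ofList (pvComp pvTable e.toList) := by
  unfold substitute_endpoint_ids_py pvSubstitutions pvComp pvTable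
  simp only [List.foldl_cons, List.foldl_nil, PySem.Str.replace]
  rw [pvReplace_eq _ _ _ (by decide), pvReplace_eq _ _ _ (by decide),
      pvReplace_eq _ _ _ (by decide), pvReplace_eq _ _ _ (by decide),
      pvReplace_eq _ _ _ (by decide)]
  simp

-- hypotheses on the substitution table that make the five passes equal one scan
def pvTableOK (ps : List (List Char × List Char)) : Prop :=
  (∀ p ∈ ps, p.1.head? = some '{' ∧ p.1.tail ≠ [] ∧ '{' ∉ p.1.tail ∧
      p.1.tail.getLast? = some '}' ∧ p.2 ≠ [] ∧ '{' ∉ p.2 ∧ '}' ∉ p.2) ∧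
  (∀ p ∈ ps, ∀ q ∈ ps, p.1.tail.length ≤ q.2.length) ∧
  (∀ p ∈ ps, ∀ q ∈ ps, p.1 ≠ q.1 → ¬ p.1 <+: q.1)

lemma pvTableOK_sub {ps qs : List (List Char × List Char)} (h : pvTableOK ps)
    (hsub : ∀ p ∈ qs, p ∈ ps) : pvTableOK qs :=
  ⟨fun p hp => h.1 p (hsub p hp),
   fun p hp q hq => h.2.1 p (hsub p hp) q (hsub q hq),
   fun p hp q hq => h.2.2 p (hsub p hp) q (hsub q hq)⟩

lemma prefix_or_of_prefix_append {a b y : List Char} (h : a <+: b ++ y) :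
    a <+: b ∨ b <+: a := by
  rcases Nat.le_total a.length b.length with hl | hl
  · exact Or.inl (List.prefix_of_prefix_length_le h (List.prefix_append b y) hl)
  · exact Or.inr (List.prefix_of_prefix_length_le (List.prefix_append b y) h hl)

-- a brace-free block passes unchanged through one replace pass of a '{'-headed key
lemma pvRepl_brace_append (k' v : List Char) :
    ∀ (p x : List Char), '{' ∉ p →
      pvRepl ('{' :: k') v (p ++ x) = p ++ pvRepl ('{' :: k') v x := by
  intro p
  induction p with
  | nil => intro x _; rfl
  | cons a p ih =>
    intro x hp
    have ha : a ≠ '{' := fun h => hp (h ▸ List.mem_cons_self)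
    have hnp : ¬ ('{' :: k').isPrefixOf (a :: (p ++ x)) = true := by
      simp only [List.isPrefixOf_iff_prefix, List.cons_prefix_cons]
      exact fun h => ha h.1.symm
    rw [List.cons_append, pvRepl_cons_neg _ _ _ _ hnp, ih x (fun h => hp (List.mem_cons_of_mem _ h))]
    rfl

-- a short, brace-free, '}'-terminated prefix of a replaced string was already a prefix
lemma pvRepl_prefix_rev (k' v : List Char) (hv : v ≠ []) (hvb : '{' ∉ v) (hvc : '}' ∉ v) :
    ∀ (s p : List Char), p ≠ [] → '{' ∉ p → p.getLast? = some '}' → p.length ≤ v.length →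
      p <+: pvRepl ('{' :: k') v s → p <+: s := by
  intro s
  induction s with
  | nil =>
    intro p hne _ _ _ hpre
    rw [pvRepl_nil] at hpre
    exact absurd (List.prefix_nil.mp hpre) hne
  | cons c t ih =>
    intro p hne hpb hpl hplen hpre
    by_cases hp : ('{' :: k').isPrefixOf (c :: t) = true
    · rw [pvRepl_cons_pos _ _ _ _ hp] at hpre
      have hpv : p <+: v := (List.isPrefix_append_of_length hplen).mp hpre
      have : '}' ∈ v := hpv.subset (List.mem_of_getLast? hpl)
      exact absurd this hvc
    · rw [pvRepl_cons_neg _ _ _ _ hp] at hpre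
      cases p with
      | nil => exact absurd rfl hne
      | cons a p' =>
        obtain ⟨hac, hp'⟩ := List.cons_prefix_cons.mp hpre
        subst hac
        cases p' with
        | nil => simp
        | cons b p'' =>
          have : (b :: p'') <+: t := by
            refine ih (b :: p'') (by simp) (fun h => hpb (List.mem_cons_of_mem _ h)) ?_
              (le_trans (by simp) hplen) hp'
            simpa [List.getLast?_cons_cons] using hpl
          exact List.cons_prefix_cons.mpr ⟨rfl, this⟩

-- one replace pass of key ki cannot create an occurrence of key kj at the front
lemma pvRepl_not_prefix (k' v kj' : List Char) (hv : v ≠ []) (hvb : '{' ∉ v) (hvc : '}' ∉ v)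
    (hkj : kj' ≠ []) (hkjb : '{' ∉ kj') (hkjl : kj'.getLast? = some '}')
    (hlen : kj'.length ≤ v.length) (s : List Char) (h : ¬ ('{' :: kj') <+: s) :
    ¬ ('{' :: kj') <+: pvRepl ('{' :: k') v s := by
  cases s with
  | nil => rw [pvRepl_nil]; simp
  | cons c t =>
    by_cases hp : ('{' :: k').isPrefixOf (c :: t) = true
    · rw [pvRepl_cons_pos _ _ _ _ hp]
      intro hpre
      cases hw : v with
      | nil => exact hv hw
      | cons vh vt =>
        rw [hw, List.cons_append] at hpre
        have := (List.cons_prefix_cons.mp hpre).1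
        exact hvb (by rw [hw]; exact this ▸ List.mem_cons_self)
    · rw [pvRepl_cons_neg _ _ _ _ hp]
      intro hpre
      obtain ⟨hc, hp'⟩ := List.cons_prefix_cons.mp hpre
      have : kj' <+: t :=
        pvRepl_prefix_rev k' v hv hvb hvc t kj' hkj hkjb hkjl hlen hp'
      exact h (List.cons_prefix_cons.mpr ⟨hc, this⟩)

lemma pvComp_nil (ps : List (List Char × List Char)) : pvComp ps [] = [] := by
  induction ps with
  | nil => rfl
  | cons q ps ih => simpa [pvComp, pvRepl_nil] using ih

-- facts about a table entry, unpacked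
lemma pvKey_shape {ps : List (List Char × List Char)} (hOK : pvTableOK ps)
    {p : List Char × List Char} (hp : p ∈ ps) : p.1 = '{' :: p.1.tail := by
  obtain ⟨h1, -, -, -, -, -, -⟩ := hOK.1 p hp
  cases hk : p.1 with
  | nil => rw [hk] at h1; simp at h1
  | cons a t => rw [hk] at h1; simp at h1; simp [h1]

-- no key of the table matches at the front ⇒ one scan step is a plain copy of one char
lemma pvComp_cons_nomatch (ps : List (List Char × List Char)) (hOK : pvTableOK ps) :
    ∀ (c : Char) (t : List Char), (∀ p ∈ ps, ¬ p.1 <+: c :: t) →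
      pvComp ps (c :: t) = c :: pvComp ps t := by
  induction ps with
  | nil => intro c t _; rfl
  | cons q ps ih =>
    intro c t hfail
    have hqshape := pvKey_shape hOK (List.mem_cons_self (a := q))
    obtain ⟨-, -, -, -, hv1, hv2, hv3⟩ := hOK.1 q List.mem_cons_self
    have hq : ¬ q.1.isPrefixOf (c :: t) = true := by
      rw [List.isPrefixOf_iff_prefix]; exact hfail q List.mem_cons_self
    have step : pvRepl q.1 q.2 (c :: t) = c :: pvRepl q.1 q.2 t :=
      pvRepl_cons_neg _ _ _ _ hq
    have hOK' : pvTableOK ps := pvTableOK_sub hOK (fun p hp => List.mem_cons_of_mem _ hp)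
    have hfail' : ∀ p ∈ ps, ¬ p.1 <+: c :: pvRepl q.1 q.2 t := by
      intro p hp
      obtain ⟨-, hkj1, hkj2, hkj3, -, -, -⟩ := hOK.1 p (List.mem_cons_of_mem _ hp)
      have hlen : p.1.tail.length ≤ q.2.length :=
        hOK.2.1 p (List.mem_cons_of_mem _ hp) q List.mem_cons_self
      have hpshape := pvKey_shape hOK (List.mem_cons_of_mem _ hp)
      have := pvRepl_not_prefix q.1.tail q.2 p.1.tail hv1 hv2 hv3 hkj1 hkj2 hkj3 hlen
        (c :: t) (by rw [← hpshape]; exact hfail p (List.mem_cons_of_mem _ hp))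
      rw [← hqshape, step, ← hpshape] at this
      exact this
    simp only [pvComp, List.foldl_cons] at ih ⊢
    rw [step, ih hOK' c (pvRepl q.1 q.2 t) hfail']

-- a key block k0 (no key of ps matches at its front) passes unchanged through passes ps
lemma pvComp_key_append (ps : List (List Char × List Char)) (k0' : List Char)
    (hk0 : '{' ∉ k0') (hheads : ∀ p ∈ ps, p.1.head? = some '{')
    (hnp : ∀ p ∈ ps, ∀ y, ¬ p.1 <+: ('{' :: k0') ++ y) :
    ∀ (x : List Char), pvComp ps (('{' :: k0') ++ x) = ('{' :: k0') ++ pvComp ps x := by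
  induction ps with
  | nil => intro x; rfl
  | cons q ps ih =>
    intro x
    have hqh := hheads q List.mem_cons_self
    obtain ⟨qt, hq1⟩ : ∃ qt, q.1 = '{' :: qt := by
      cases hk : q.1 with
      | nil => rw [hk] at hqh; simp at hqh
      | cons a t => rw [hk] at hqh; simp at hqh; exact ⟨t, by simp [hqh]⟩
    have hq : ¬ q.1.isPrefixOf ('{' :: (k0' ++ x)) = true := by
      rw [List.isPrefixOf_iff_prefix]
      exact hnp q List.mem_cons_self x
    rw [hq1] at hq
    have step : pvRepl q.1 q.2 (('{' :: k0') ++ x) = ('{' :: k0') ++ pvRepl q.1 q.2 x := by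
      rw [hq1]
      rw [show ('{' :: k0') ++ x = '{' :: (k0' ++ x) from rfl,
        pvRepl_cons_neg _ _ _ _ hq, pvRepl_brace_append qt q.2 k0' x hk0]
      rfl
    simp only [pvComp, List.foldl_cons] at ih ⊢
    rw [step, ih (fun p hp => hheads p (List.mem_cons_of_mem _ hp))
      (fun p hp y => hnp p (List.mem_cons_of_mem _ hp) y) (pvRepl q.1 q.2 x)]

-- a brace-free substituted value passes unchanged through later passes
lemma pvComp_value_append (ps : List (List Char × List Char)) (v : List Char)
    (hv : '{' ∉ v) (hheads : ∀ p ∈ ps, p.1.head? = some '{') :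
    ∀ (z : List Char), pvComp ps (v ++ z) = v ++ pvComp ps z := by
  induction ps with
  | nil => intro z; rfl
  | cons q ps ih =>
    intro z
    have hqh := hheads q List.mem_cons_self
    have hqshape : q.1 = '{' :: q.1.tail := by
      cases hk : q.1 with
      | nil => rw [hk] at hqh; simp at hqh
      | cons a t => rw [hk] at hqh; simp at hqh; simp [hqh]
    have step : pvRepl q.1 q.2 (v ++ z) = v ++ pvRepl q.1 q.2 z := by
      rw [hqshape, pvRepl_brace_append]; exact hv
    simp only [pvComp, List.foldl_cons] at ih ⊢
    rw [step, ih (fun p hp => hheads p (List.mem_cons_of_mem _ hp)) (pvRepl q.1 q.2 z)]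

-- the first matching key k0 is replaced by v0 and all passes recurse on the rest
lemma pvComp_split (ps1 ps2 : List (List Char × List Char)) (k0 v0 : List Char)
    (hOK : pvTableOK (ps1 ++ (k0, v0) :: ps2)) (x : List Char)
    (hfail : ∀ p ∈ ps1, ¬ p.1 <+: k0 ++ x) :
    pvComp (ps1 ++ (k0, v0) :: ps2) (k0 ++ x) = v0 ++ pvComp (ps1 ++ (k0, v0) :: ps2) x := by
  have hmem0 : (k0, v0) ∈ ps1 ++ (k0, v0) :: ps2 := by simp
  have hk0shape : k0 = '{' :: k0.tail := pvKey_shape hOK hmem0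
  obtain ⟨-, -, hk0b, -, hv01, hv02, -⟩ := hOK.1 (k0, v0) hmem0
  have hmem1 : ∀ p ∈ ps1, p ∈ ps1 ++ (k0, v0) :: ps2 := fun p hp => by simp [hp]
  have hmem2 : ∀ p ∈ ps2, p ∈ ps1 ++ (k0, v0) :: ps2 := fun p hp => by simp [hp]
  have hnp : ∀ p ∈ ps1, ∀ y, ¬ p.1 <+: k0 ++ y := by
    intro p hp y hpre
    by_cases heq : p.1 = k0
    · exact hfail p hp (heq ▸ List.prefix_append _ _)
    · rcases prefix_or_of_prefix_append hpre with h | h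
      · exact hOK.2.2 p (hmem1 p hp) (k0, v0) hmem0 heq h
      · exact hOK.2.2 (k0, v0) hmem0 p (hmem1 p hp) (fun h' => heq h'.symm) h
  have heads : ∀ p ∈ ps1 ++ (k0, v0) :: ps2, p.1.head? = some '{' := by
    intro p hp; exact (hOK.1 p hp).1
  have s1 : pvComp ps1 (k0 ++ x) = k0 ++ pvComp ps1 x := by
    have := pvComp_key_append ps1 k0.tail hk0b
      (fun p hp => heads p (hmem1 p hp))
      (fun p hp y => by rw [← hk0shape]; exact hnp p hp y) x
    rwa [← hk0shape] at this
  have step0 : pvRepl k0 v0 (k0 ++ pvComp ps1 x) = v0 ++ pvRepl k0 v0 (pvComp ps1 x) := by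
    conv_lhs => rw [hk0shape, List.cons_append]
    rw [pvRepl_cons_pos _ _ _ _ (by rw [← hk0shape, ← List.cons_append, ← hk0shape,
          List.isPrefixOf_iff_prefix]; exact List.prefix_append _ _)]
    congr 1
    rw [← hk0shape]
    congr 1
    have : k0.tail.length = k0.length - 1 := by rw [hk0shape]; simp
    rw [← this, List.drop_left]
  have s2 : ∀ z, pvComp ps2 (v0 ++ z) = v0 ++ pvComp ps2 z :=
    pvComp_value_append ps2 v0 hv02 (fun p hp => heads p (hmem2 p hp))
  simp only [pvComp, List.foldl_append, List.foldl_cons]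
  show pvComp ps2 (pvRepl k0 v0 (pvComp ps1 (k0 ++ x)))
      = v0 ++ pvComp ps2 (pvRepl k0 v0 (pvComp ps1 x))
  rw [s1, step0, s2]

lemma pvFindMatch_none {ps : List (List Char × List Char)} {l : List Char}
    (h : pvFindMatch ps l = none) : ∀ p ∈ ps, ¬ p.1 <+: l := by
  induction ps with
  | nil => intro p hp; simp at hp
  | cons q ps ih =>
    intro p hp
    rw [pvFindMatch] at h
    by_cases hq : q.1.isPrefixOf l = true
    · rw [show q = (q.1, q.2) from rfl] at h; simp [hq] at h
    · rcases List.mem_cons.mp hp with rfl | hp'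
      · rw [List.isPrefixOf_iff_prefix] at hq; exact hq
      · refine ih ?_ p hp'
        rw [show q = (q.1, q.2) from rfl] at h; simpa [hq] using h

lemma pvFindMatch_some {ps : List (List Char × List Char)} {l v : List Char} {n : Nat}
    (h : pvFindMatch ps l = some (v, n)) :
    ∃ ps1 k ps2, ps = ps1 ++ (k, v) :: ps2 ∧ k <+: l ∧ n = k.length ∧
      ∀ p ∈ ps1, ¬ p.1 <+: l := by
  induction ps with
  | nil => simp [pvFindMatch] at h
  | cons q ps ih =>
    rw [pvFindMatch, show q = (q.1, q.2) from rfl] at h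
    by_cases hq : q.1.isPrefixOf l = true
    · simp only [hq, if_true, Option.some.injEq, Prod.mk.injEq] at h
      exact ⟨[], q.1, ps, by simp [← h.1], List.isPrefixOf_iff_prefix.mp hq, h.2.symm,
        by intro p hp; simp at hp⟩
    · simp only [hq] at h
      obtain ⟨ps1, k, ps2, hps, hk, hn, hfail⟩ := ih h
      refine ⟨q :: ps1, k, ps2, by simp [hps], hk, hn, ?_⟩
      intro p hp
      rcases List.mem_cons.mp hp with rfl | hp'
      · rw [List.isPrefixOf_iff_prefix] at hq; exact hq
      · exact hfail p hp'

lemma pvTableOK_pvTable : pvTableOK pvTable := by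
  unfold pvTableOK pvTable
  decide

lemma pvComp_eq_pvScan : ∀ (n : Nat) (l : List Char), l.length ≤ n →
    pvComp pvTable l = pvScan l := by
  intro n
  induction n with
  | zero =>
    intro l h
    have : l = [] := List.eq_nil_of_length_eq_zero (Nat.le_zero.mp h)
    subst this
    rw [pvComp_nil, pvScan]
  | succ n ih =>
    intro l h
    cases l with
    | nil => rw [pvComp_nil, pvScan]
    | cons c t =>
      rw [pvScan]
      cases hm : pvFindMatch pvTable (c :: t) with
      | none =>
        rw [pvComp_cons_nomatch pvTable pvTableOK_pvTable c t (pvFindMatch_none hm)]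
        rw [ih t (by simp at h; omega)]
      | some vn =>
        obtain ⟨v, m⟩ := vn
        obtain ⟨ps1, k, ps2, hps, hk, hn, hfail⟩ := pvFindMatch_some hm
        obtain ⟨x, hx⟩ := hk
        have hkshape : k = '{' :: k.tail := by
          have : (k, v) ∈ pvTable := by rw [hps]; simp
          exact pvKey_shape pvTableOK_pvTable this
        have hklen : 1 ≤ k.length := by rw [hkshape]; simp
        have hteq : t = k.tail ++ x := by
          rw [hkshape, List.cons_append] at hx
          exact (List.cons.injEq _ _ _ _ ▸ hx).2.symm ▸ rfl
        have hdrop : t.drop (m - 1) = x := by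
          rw [hteq, hn]
          have : k.tail.length = k.length - 1 := by rw [hkshape]; simp
          rw [← this, List.drop_left]
        have hxlen : x.length ≤ n := by
          have : (c :: t).length = k.length + x.length := by rw [← hx]; simp
          simp at h this; omega
        show pvComp pvTable (c :: t) = v ++ pvScan (t.drop (m - 1))
        show pvComp pvTable (c :: t) = v ++ pvScan (t.drop (m - 1))
        rw [hdrop]
        have hcomp : pvComp pvTable (c :: t) = v ++ pvComp pvTable x := by
          rw [← hx, hps]
          exact pvComp_split ps1 ps2 k v (hps ▸ pvTableOK_pvTable) x
            (fun p hp => hx ▸ hfail p hp)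
        rw [hcomp, ih x hxlen]

-- ===== VERDICT (by name: the statement is the Claim_ definition above) =====
theorem substitute_endpoint_ids_py_spec : Claim_equal_substitute_endpoint_ids_py := by
  intro endpoint _
  unfold Spec_substitute_endpoint_ids_py substitute_endpoint_ids_py_alt
  rw [portA_eq, pvComp_eq_pvScan endpoint.toList.length endpoint.toList le_rfl]
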